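-- pv_equiv track=rewrite | github.com/tish-tar/decoder | a1.py | get_instructions
-- ===== SOURCE A (Python) =====
-- def get_instructions(message_to_read):
--
--     message_to_read = message_to_read.lower()
--     has_buzz = False
--
--     if "buzz" in message_to_read:
--         message_to_read = message_to_read.replace("buzz", "uzz", 1)
--         has_buzz = True
--
--     cipher_1 = ""
--
--     for j in message_to_read:
--         if j == "a":
--             cipher_1 = cipher_1 + "\u2191" #up
--         if j == "b":
--             cipher_1 = cipher_1 + "\u2193" #down
--         if j == "c":
--             cipher_1 = cipher_1 + "\u2190" #left
--         if j == "d":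
--             cipher_1 = cipher_1 + "\u2192" #right
--
--     #checks for fizz and applies inversion, applies rotation if has_buzz is True
--     if "fizz" in message_to_read:
--         cipher_1 = make_string_invert(cipher_1)
--
--     if has_buzz:
--         cipher_1 = make_string_rotate(cipher_1)
--
--     return cipher_1
--
-- def rotate_arrow(arrow_to_rotate):
--     if arrow_to_rotate == "\u2191":
--         return "\u2192"
--     if arrow_to_rotate == "\u2193":
--         return "\u2190"
--     if arrow_to_rotate == "\u2190":
--         return "\u2191"
--     if arrow_to_rotate == "\u2192":
--         return "\u2193"
--
-- def make_string_rotate(cipher_to_rotate):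
--     rotated_cipher = ""
--     for a in cipher_to_rotate:
--         rotated_cipher += rotate_arrow(a)
--     return rotated_cipher
--
-- def invert_arrow(arrow_to_invert):
--     if arrow_to_invert == "\u2191":
--         return "\u2193"
--     if arrow_to_invert == "\u2193":
--         return "\u2191"
--     if arrow_to_invert == "\u2190":
--         return "\u2192"
--     if arrow_to_invert == "\u2192":
--         return "\u2190"
--
-- def make_string_invert(cipher_to_invert):
--     inverted_cipher = ""
--     for a in cipher_to_invert:
--         inverted_cipher += invert_arrow(a)
--     return inverted_cipher
-- ===== SOURCE B (Python) =====
-- def get_instructions(message_to_read):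
--     message_to_read = message_to_read.lower()
--     has_buzz = "buzz" in message_to_read
--     if has_buzz:
--         message_to_read = message_to_read.replace("buzz", "uzz", 1)
--     table = {'a': '\u2191', 'b': '\u2193', 'c': '\u2190', 'd': '\u2192'}
--     if "fizz" in message_to_read:
--         flip = {'\u2191': '\u2193', '\u2193': '\u2191', '\u2190': '\u2192', '\u2192': '\u2190'}
--         table = {k: flip[v] for k, v in table.items()}
--     if has_buzz:
--         rot = {'\u2191': '\u2192', '\u2193': '\u2190', '\u2190': '\u2191', '\u2192': '\u2193'}
--         table = {k: rot[v] for k, v in table.items()}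
--     return "".join(table[ch] for ch in message_to_read if ch in table)
-- ===== Notes on version B (the rewrite author's own statement) =====
-- stated objective: simpler
-- what changed: A's three sequential passes (encode, conditional invert pass, conditional rotate pass) are replaced by building one final 4-entry translation table from the invert/rotate flags and doing a single pass over the message.
import Mathlib
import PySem

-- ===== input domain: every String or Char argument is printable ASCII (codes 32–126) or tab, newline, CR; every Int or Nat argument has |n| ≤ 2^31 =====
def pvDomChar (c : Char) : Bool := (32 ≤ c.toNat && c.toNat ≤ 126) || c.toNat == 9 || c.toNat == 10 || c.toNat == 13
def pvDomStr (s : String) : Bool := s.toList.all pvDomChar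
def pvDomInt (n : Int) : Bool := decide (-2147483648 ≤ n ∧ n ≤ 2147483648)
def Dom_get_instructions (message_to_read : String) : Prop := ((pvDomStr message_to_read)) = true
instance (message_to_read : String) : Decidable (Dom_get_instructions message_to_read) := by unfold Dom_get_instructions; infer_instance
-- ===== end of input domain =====

-- B replaces A's three sequential passes (encode, conditional invert, conditional rotate) by one
-- flag-derived 4-entry translation table and a single pass over the message ("simpler").

-- s.replace("buzz", "uzz", 1): PySem.Str.replace has no count argument, so the count=1 form is
-- ported by hand, step for step (scan left to right, rewrite the first occurrence only) — exact.
def pvReplaceBuzz1 : List Char → List Char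
  | [] => []
  | c :: rest =>
      if ['b', 'u', 'z', 'z'].isPrefixOf (c :: rest) then 'u' :: 'z' :: 'z' :: rest.drop 3
      else c :: pvReplaceBuzz1 rest

-- ===== PORT A =====
-- Python's rotate_arrow/invert_arrow return None on a non-arrow; A only ever calls them on
-- arrows, so that branch is unreachable; the port returns the character unchanged there.
def rotate_arrow (a : Char) : Char :=
  if a = '↑' then '→' else if a = '↓' then '←' else if a = '←' then '↑' else if a = '→' then '↓' else a

def make_string_rotate (cipher_to_rotate : List Char) : List Char :=
  cipher_to_rotate.foldl (fun acc a => acc ++ [rotate_arrow a]) []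

def invert_arrow (a : Char) : Char :=
  if a = '↑' then '↓' else if a = '↓' then '↑' else if a = '←' then '→' else if a = '→' then '←' else a

def make_string_invert (cipher_to_invert : List Char) : List Char :=
  cipher_to_invert.foldl (fun acc a => acc ++ [invert_arrow a]) []

def get_instructions (message_to_read : String) : String :=
  let msg := (PySem.Str.lower message_to_read).toList
  let hasBuzz := PySem.Chars.isIn "buzz".toList msg
  let msg := if hasBuzz then pvReplaceBuzz1 msg else msg
  let cipher := msg.foldl (fun acc j =>
      let acc := if j = 'a' then acc ++ ['↑'] else acc
      let acc := if j = 'b' then acc ++ ['↓'] else acc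
      let acc := if j = 'c' then acc ++ ['←'] else acc
      if j = 'd' then acc ++ ['→'] else acc) []
  let cipher := if PySem.Chars.isIn "fizz".toList msg then make_string_invert cipher else cipher
  let cipher := if hasBuzz then make_string_rotate cipher else cipher
  String.ofList cipher

-- ===== PORT B =====
-- flip[v] / rot[v]: v is always one of the four arrows, so the lookup never misses;
-- the KeyError branch is unreachable and the port defaults to v there.
def get_instructions_alt (message_to_read : String) : String :=
  let msg := (PySem.Str.lower message_to_read).toList
  let hasBuzz := PySem.Chars.isIn "buzz".toList msg
  let msg := if hasBuzz then pvReplaceBuzz1 msg else msg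
  let table := PySem.Dict.ofList [('a', '↑'), ('b', '↓'), ('c', '←'), ('d', '→')]
  let table := if PySem.Chars.isIn "fizz".toList msg then
      let flip := PySem.Dict.ofList [('↑', '↓'), ('↓', '↑'), ('←', '→'), ('→', '←')]
      PySem.Dict.ofList (table.items.map (fun p => (p.1, flip.getD p.2 p.2)))
    else table
  let table := if hasBuzz then
      let rot := PySem.Dict.ofList [('↑', '→'), ('↓', '←'), ('←', '↑'), ('→', '↓')]
      PySem.Dict.ofList (table.items.map (fun p => (p.1, rot.getD p.2 p.2)))
    else table
  String.ofList (msg.filterMap (fun ch => table.get? ch))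

-- ===== PRECONDITION & SPEC =====
def Spec_get_instructions (message_to_read : String) (out : String) : Prop := out = get_instructions_alt message_to_read
instance (message_to_read : String) (out : String) : Decidable (Spec_get_instructions message_to_read out) := by unfold Spec_get_instructions; infer_instance

-- ===== CLAIM (what is proved, stated in full; the proofs are below) =====
def Claim_equal_get_instructions : Prop := ∀ (message_to_read : String), Dom_get_instructions message_to_read → Spec_get_instructions message_to_read (get_instructions message_to_read)

-- ===== LEMMAS AND PROOFS =====

-- per-character encoding performed by A's first loop (≤ 1 output character per input character)
def pvEnc (j : Char) : Option Char :=
  if j = 'a' then some '↑' else if j = 'b' then some '↓' else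
  if j = 'c' then some '←' else if j = 'd' then some '→' else none

lemma pvStep_eq (acc : List Char) (j : Char) :
    (let acc := if j = 'a' then acc ++ ['↑'] else acc
     let acc := if j = 'b' then acc ++ ['↓'] else acc
     let acc := if j = 'c' then acc ++ ['←'] else acc
     if j = 'd' then acc ++ ['→'] else acc) = acc ++ (pvEnc j).toList := by
  simp only [pvEnc]
  split_ifs <;> simp_all

lemma pvFold_enc (cs : List Char) (acc : List Char) :
    cs.foldl (fun acc j =>
      let acc := if j = 'a' then acc ++ ['↑'] else acc
      let acc := if j = 'b' then acc ++ ['↓'] else acc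
      let acc := if j = 'c' then acc ++ ['←'] else acc
      if j = 'd' then acc ++ ['→'] else acc) acc = acc ++ cs.filterMap pvEnc := by
  induction cs generalizing acc with
  | nil => simp
  | cons c cs ih =>
      rw [List.foldl_cons, pvStep_eq, ih, List.filterMap_cons]
      cases h : pvEnc c <;> simp

lemma pvInvert_eq_map (cs : List Char) : make_string_invert cs = cs.map invert_arrow := by
  simpa [make_string_invert] using PySem.List.foldl_append_singleton_eq_map invert_arrow cs []

lemma pvRotate_eq_map (cs : List Char) : make_string_rotate cs = cs.map rotate_arrow := by
  simpa [make_string_rotate] using PySem.List.foldl_append_singleton_eq_map rotate_arrow cs []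

lemma pvMap_ite (b : Bool) (f : Char → Char) (l : List Char) :
    (if b then l.map f else l) = l.map (fun a => if b then f a else a) := by
  cases b <;> simp

lemma pvGet?_abcd_none (d : PySem.Dict Char Char) (hk : d.keys = ['a', 'b', 'c', 'd']) (ch : Char)
    (h1 : ¬ch = 'a') (h2 : ¬ch = 'b') (h3 : ¬ch = 'c') (h4 : ¬ch = 'd') : d.get? ch = none := by
  rw [PySem.Dict.get?_eq_none_iff_not_mem_keys, hk]; simp [h1, h2, h3, h4]

-- B's final table lookup agrees, per character, with rotate? ∘ invert? ∘ A's encoding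
lemma pvTable_eq (fz hb : Bool) (ch : Char) :
    (let table := PySem.Dict.ofList [('a', '↑'), ('b', '↓'), ('c', '←'), ('d', '→')]
     let table := if fz then
         let flip := PySem.Dict.ofList [('↑', '↓'), ('↓', '↑'), ('←', '→'), ('→', '←')]
         PySem.Dict.ofList (table.items.map (fun p => (p.1, flip.getD p.2 p.2)))
       else table
     let table := if hb then
         let rot := PySem.Dict.ofList [('↑', '→'), ('↓', '←'), ('←', '↑'), ('→', '↓')]
         PySem.Dict.ofList (table.items.map (fun p => (p.1, rot.getD p.2 p.2)))
       else table
     table.get? ch)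
    = Option.map (fun a => if hb then rotate_arrow a else a)
        (Option.map (fun a => if fz then invert_arrow a else a) (pvEnc ch)) := by
  by_cases h1 : ch = 'a'
  · subst h1; cases fz <;> cases hb <;> decide
  by_cases h2 : ch = 'b'
  · subst h2; cases fz <;> cases hb <;> decide
  by_cases h3 : ch = 'c'
  · subst h3; cases fz <;> cases hb <;> decide
  by_cases h4 : ch = 'd'
  · subst h4; cases fz <;> cases hb <;> decide
  · simp only [pvEnc, h1, h2, h3, h4]
    cases fz <;> cases hb <;> simp only [Bool.false_eq_true, if_false, if_true] <;>
      simp only [Option.map_none] <;>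
      exact pvGet?_abcd_none _ (by decide) ch h1 h2 h3 h4

-- ===== VERDICT (by name: the statement is the Claim_ definition above) =====
theorem get_instructions_spec : Claim_equal_get_instructions := by
  intro m _
  show get_instructions m = get_instructions_alt m
  unfold get_instructions get_instructions_alt
  simp only [pvFold_enc, List.nil_append, pvInvert_eq_map, pvRotate_eq_map]
  apply congrArg String.ofList
  rw [pvMap_ite, pvMap_ite, List.map_map, List.map_filterMap]
  refine List.filterMap_congr ?_
  intro ch _
  rw [pvTable_eq]
  cases pvEnc ch <;> rfl
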